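-- pv_equiv track=rewrite | github.com/ywatanabe1989/scitex-cloud | apps/scholar/simple_views.py | generate_ris
-- ===== SOURCE A (Python) =====
-- def generate_ris(title, authors, journal, year, doi, url, volume, pages, pmid):
--     """Generate RIS citation."""
--     ris = "TY  - JOUR\n"
--     ris += f"TI  - {title}\n"
--
--     # Handle multiple authors
--     if authors:
--         author_list = authors.replace(' and ', ', ').split(', ')
--         for author in author_list:
--             ris += f"AU  - {author.strip()}\n"
--
--     ris += f"JO  - {journal}\n"
--     ris += f"PY  - {year}\n"
--
--     if volume:
--         ris += f"VL  - {volume}\n"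
--     if pages:
--         ris += f"SP  - {pages}\n"
--     if doi:
--         ris += f"DO  - {doi}\n"
--     if url:
--         ris += f"UR  - {url}\n"
--     if pmid:
--         ris += f"ID  - {pmid}\n"
--
--     ris += "ER  - \n"
--     return ris
-- ===== SOURCE B (Python) =====
-- def generate_ris(title, authors, journal, year, doi, url, volume, pages, pmid):
--     """Generate RIS citation via a multi-valued tag record and one uniform emitter."""
--     record = [
--         ('TY', ['JOUR']),
--         ('TI', [title]),
--         ('AU', [a.strip() for a in authors.replace(' and ', ', ').split(', ')] if authors else []),
--         ('JO', [journal]),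
--         ('PY', [year]),
--         ('VL', [volume] if volume else []),
--         ('SP', [pages] if pages else []),
--         ('DO', [doi] if doi else []),
--         ('UR', [url] if url else []),
--         ('ID', [pmid] if pmid else []),
--         ('ER', ['']),
--     ]
--     return ''.join(f"{tag}  - {value}\n" for tag, values in record for value in values)
-- ===== Notes on version B (the rewrite author's own statement) =====
-- stated objective: alternative
-- what changed: B first builds the citation as a structured multi-valued record (ordered list of tag -> list-of-values pairs, where absent optional fields and missing authors are empty value lists and ER carries the empty value), then a single uniform emitter renders every (tag, value) pair as a line; A instead grows a string through hard-coded sequential if-blocks with a special-cased author loop and ER line.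
import Mathlib
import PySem

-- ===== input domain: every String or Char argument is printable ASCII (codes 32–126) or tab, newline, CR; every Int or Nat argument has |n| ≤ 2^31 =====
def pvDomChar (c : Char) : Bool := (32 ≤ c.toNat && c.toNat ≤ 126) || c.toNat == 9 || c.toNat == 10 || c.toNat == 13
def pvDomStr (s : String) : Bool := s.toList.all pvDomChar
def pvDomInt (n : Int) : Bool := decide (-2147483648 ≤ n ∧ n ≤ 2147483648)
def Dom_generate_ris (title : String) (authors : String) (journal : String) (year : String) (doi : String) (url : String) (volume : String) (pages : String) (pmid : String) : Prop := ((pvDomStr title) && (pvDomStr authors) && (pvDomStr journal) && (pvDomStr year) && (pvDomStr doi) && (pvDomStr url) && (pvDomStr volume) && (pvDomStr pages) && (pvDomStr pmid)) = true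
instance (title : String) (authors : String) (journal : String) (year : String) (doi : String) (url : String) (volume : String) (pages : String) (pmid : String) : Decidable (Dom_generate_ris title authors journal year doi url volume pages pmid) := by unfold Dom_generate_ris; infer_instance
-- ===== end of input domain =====

-- B builds the citation as a structured multi-valued record (tag -> list of values; absent
-- fields = empty lists, ER carries the empty value) rendered by one uniform emitter, instead
-- of A's sequential if-blocks of string concatenation: an alternative decomposition, same cost.

-- ===== PORT A =====
-- literal transliteration of A: a string accumulator grown by += in source order
-- (authors.replace(' and ', ', ').split(', ') is ported with PySem.Str.split?, exact since the separator ", " is nonempty)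
def generate_ris (title : String) (authors : String) (journal : String) (year : String) (doi : String) (url : String) (volume : String) (pages : String) (pmid : String) : String :=
  let ris := "TY  - JOUR\n"
  let ris := ris ++ ("TI  - " ++ title ++ "\n")
  let ris :=
    if authors ≠ "" then
      ((PySem.Str.split? (PySem.Str.replace authors " and " ", ") ", ").getD []).foldl
        (fun r author => r ++ ("AU  - " ++ PySem.Str.strip author ++ "\n")) ris
    else ris
  let ris := ris ++ ("JO  - " ++ journal ++ "\n")
  let ris := ris ++ ("PY  - " ++ year ++ "\n")
  let ris := if volume ≠ "" then ris ++ ("VL  - " ++ volume ++ "\n") else ris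
  let ris := if pages ≠ "" then ris ++ ("SP  - " ++ pages ++ "\n") else ris
  let ris := if doi ≠ "" then ris ++ ("DO  - " ++ doi ++ "\n") else ris
  let ris := if url ≠ "" then ris ++ ("UR  - " ++ url ++ "\n") else ris
  let ris := if pmid ≠ "" then ris ++ ("ID  - " ++ pmid ++ "\n") else ris
  ris ++ "ER  - \n"

-- ===== PORT B =====
-- literal transliteration of B: the ordered multi-valued record (tag, values) …
def ris_record (title : String) (authors : String) (journal : String) (year : String) (doi : String) (url : String) (volume : String) (pages : String) (pmid : String) : List (String × List String) :=
  [ ("TY", ["JOUR"]),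
    ("TI", [title]),
    ("AU", if authors ≠ "" then
             ((PySem.Str.split? (PySem.Str.replace authors " and " ", ") ", ").getD []).map
               (fun a => PySem.Str.strip a)
           else []),
    ("JO", [journal]),
    ("PY", [year]),
    ("VL", if volume ≠ "" then [volume] else []),
    ("SP", if pages ≠ "" then [pages] else []),
    ("DO", if doi ≠ "" then [doi] else []),
    ("UR", if url ≠ "" then [url] else []),
    ("ID", if pmid ≠ "" then [pmid] else []),
    ("ER", [""]) ]

-- … rendered by one uniform emitter: ''.join(f"{tag}  - {value}\n" for tag, values in record for value in values)
def generate_ris_alt (title : String) (authors : String) (journal : String) (year : String) (doi : String) (url : String) (volume : String) (pages : String) (pmid : String) : String :=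
  PySem.Str.join ""
    ((ris_record title authors journal year doi url volume pages pmid).flatMap
      (fun p => p.2.map (fun v => p.1 ++ "  - " ++ v ++ "\n")))

-- ===== PRECONDITION & SPEC =====
def Spec_generate_ris (title : String) (authors : String) (journal : String) (year : String) (doi : String) (url : String) (volume : String) (pages : String) (pmid : String) (out : String) : Prop := out = generate_ris_alt title authors journal year doi url volume pages pmid
instance (title : String) (authors : String) (journal : String) (year : String) (doi : String) (url : String) (volume : String) (pages : String) (pmid : String) (out : String) : Decidable (Spec_generate_ris title authors journal year doi url volume pages pmid out) := by unfold Spec_generate_ris; infer_instance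

-- ===== CLAIM (what is proved, stated in full; the proofs are below) =====
def Claim_equal_generate_ris : Prop := ∀ (title : String) (authors : String) (journal : String) (year : String) (doi : String) (url : String) (volume : String) (pages : String) (pmid : String), Dom_generate_ris title authors journal year doi url volume pages pmid → Spec_generate_ris title authors journal year doi url volume pages pmid (generate_ris title authors journal year doi url volume pages pmid)

-- ===== LEMMAS AND PROOFS =====

-- plain concatenation of a list of strings
def scat : List String → String
  | [] => ""
  | x :: xs => x ++ scat xs

theorem scat_append (xs ys : List String) :
    scat (xs ++ ys) = scat xs ++ scat ys := by
  induction xs with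
  | nil => simp [scat]
  | cons x xs ih => simp [scat, ih, String.append_assoc]

-- ''.join(xs) is plain concatenation
theorem join_empty (xs : List String) : PySem.Str.join "" xs = scat xs := by
  induction xs with
  | nil => rfl
  | cons x ys ih =>
      cases ys with
      | nil =>
          show String.ofList (PySem.Chars.join "".toList [x.toList]) = _
          rw [PySem.Chars.join_singleton]
          simp [scat, String.ofList_toList]
      | cons y zs =>
          have h : PySem.Str.join "" (x :: y :: zs) = x ++ PySem.Str.join "" (y :: zs) := by
            show String.ofList (PySem.Chars.join "".toList (x.toList :: y.toList :: zs.map String.toList)) = _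
            rw [PySem.Chars.join_cons_cons]
            simp [String.ofList_append, String.ofList_toList]
            rfl
          rw [h, ih]; simp [scat]

theorem foldl_scat (f : String → String) (xs : List String) (s : String) :
    xs.foldl (fun r a => r ++ (f a ++ "\n")) s = s ++ scat (xs.map fun a => f a ++ "\n") := by
  induction xs generalizing s with
  | nil => simp [scat]
  | cons x xs ih => simp [scat, ih, String.append_assoc]

theorem tag_merge (a b c : String) (h : a ++ b = c) (t : String) : a ++ (b ++ t) = c ++ t := by
  rw [← String.append_assoc, h]

-- ===== VERDICT (by name: the statement is the Claim_ definition above) =====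
set_option maxHeartbeats 2000000 in
theorem generate_ris_spec : Claim_equal_generate_ris := by
  intro title authors journal year doi url volume pages pmid _
  unfold Spec_generate_ris generate_ris generate_ris_alt ris_record
  rw [join_empty]
  simp only [List.flatMap_cons, List.flatMap_nil]
  simp only [foldl_scat (fun a => "AU  - " ++ PySem.Str.strip a)]
  by_cases ha : authors ≠ "" <;>
  by_cases hv : volume ≠ "" <;>
  by_cases hp : pages ≠ "" <;>
  by_cases hd : doi ≠ "" <;>
  by_cases hu : url ≠ "" <;>
  by_cases hm : pmid ≠ "" <;>
    simp [ha, hv, hp, hd, hu, hm, scat, scat_append, List.map, Function.comp_def,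
      String.append_assoc,
      show ("TY  - JOUR\n" : String) = "TY  - JOUR" ++ "\n" from rfl,
      show ("ER  - \n" : String) = "ER  - " ++ "\n" from rfl,
      tag_merge "AU" "  - " "AU  - " rfl,
      tag_merge "TY" "  - " "TY  - " rfl, tag_merge "TI" "  - " "TI  - " rfl,
      tag_merge "JO" "  - " "JO  - " rfl, tag_merge "PY" "  - " "PY  - " rfl,
      tag_merge "VL" "  - " "VL  - " rfl, tag_merge "SP" "  - " "SP  - " rfl,
      tag_merge "DO" "  - " "DO  - " rfl, tag_merge "UR" "  - " "UR  - " rfl,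
      tag_merge "ID" "  - " "ID  - " rfl,
      tag_merge "ER" "  - " "ER  - " rfl]
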